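-- pv_equiv track=rewrite | github.com/mohamed-elkholy95/Pythinker | backend/app/domain/services/agents/response_generator.py | _normalize_metric_label
-- ===== SOURCE A (Python) =====
-- def _normalize_metric_label(value: str, fallback: str = "unknown") -> str:
--     """Convert label values to predictable, low-cardinality token format."""
--     raw = (value or "").strip().lower()
--     if not raw:
--         return fallback
--
--     normalized_chars = [char if char.isalnum() else "_" for char in raw]
--     normalized = "".join(normalized_chars).strip("_")
--     while "__" in normalized:
--         normalized = normalized.replace("__", "_")
--     return normalized or fallback
-- ===== SOURCE B (Python) =====
-- def _normalize_metric_label(value: str, fallback: str = "unknown") -> str: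
--     """Single pass: emit alphanumeric runs joined by single underscores."""
--     raw = (value or "").strip().lower()
--     out = []
--     token_open = False
--     for ch in raw:
--         if ch.isalnum():
--             if not token_open and out:
--                 out.append("_")
--             out.append(ch)
--             token_open = True
--         else:
--             token_open = False
--     return "".join(out) or fallback
-- ===== Notes on version B (the rewrite author's own statement) =====
-- stated objective: simpler
-- what changed: Replaced A's per-char mapping, edge-strip and repeated collapse-replace loop by a single pass that emits alphanumeric runs joined by single separators.
import Mathlib
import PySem

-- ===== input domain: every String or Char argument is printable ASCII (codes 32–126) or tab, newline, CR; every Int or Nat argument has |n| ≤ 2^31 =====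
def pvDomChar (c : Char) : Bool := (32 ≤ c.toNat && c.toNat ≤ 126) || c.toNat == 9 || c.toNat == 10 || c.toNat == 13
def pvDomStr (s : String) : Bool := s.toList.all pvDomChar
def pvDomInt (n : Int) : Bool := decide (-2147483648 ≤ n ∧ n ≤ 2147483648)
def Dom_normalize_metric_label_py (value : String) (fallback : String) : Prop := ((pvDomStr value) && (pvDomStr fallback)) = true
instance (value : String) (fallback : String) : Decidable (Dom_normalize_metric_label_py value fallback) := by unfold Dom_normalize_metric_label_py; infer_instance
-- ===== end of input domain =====

-- B replaces A's per-char map + strip("_") + while-"__"-collapse by one pass that joins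
-- alphanumeric runs with single underscores (objective: simpler; same return value everywhere).

-- ===== PORT A =====
-- A-side helpers: the `while "__" in s: s = s.replace("__","_")` loop needs a termination
-- argument, so we first characterise PySem.Chars.replace for this fixed pattern.

/-- One pass of Python's `s.replace("__", "_")` (left-to-right, non-overlapping). -/
def replU : List Char → List Char
  | a :: b :: t => if a = '_' ∧ b = '_' then '_' :: replU t else a :: replU (b :: t)
  | l => l

/-- Whether the list contains two consecutive underscores (`"__" in s`). -/
def hasDDU : List Char → Bool
  | a :: b :: t => (a == '_' && b == '_') || hasDDU (b :: t)
  | _ => false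

theorem replU_len_le (l : List Char) : (replU l).length ≤ l.length := by
  fun_induction replU l with
  | case1 a b t h ih => simp; omega
  | case2 a b t h ih => simp at ih ⊢; omega
  | case3 l h => exact le_refl _

theorem replU_len_lt (l : List Char) (h : hasDDU l = true) : (replU l).length < l.length := by
  fun_induction replU l with
  | case1 a b t hab ih =>
    have := replU_len_le t
    simp only [List.length_cons]
    omega
  | case2 a b t hab ih =>
    simp [hasDDU] at h
    rcases h with ⟨ha, hb⟩ | h
    · exact absurd ⟨ha, hb⟩ hab
    · have := ih h; simp at this ⊢; omega
  | case3 l hl =>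
    exfalso
    match l, hl, h with
    | [], _, h => simp [hasDDU] at h
    | [a], _, h => simp [hasDDU] at h
    | a :: b :: t, hl, _ => exact hl a b t rfl

theorem infix_dd_iff (l : List Char) : (['_', '_'] <:+: l) ↔ hasDDU l = true := by
  induction l with
  | nil =>
    simp [hasDDU]
  | cons a t ih =>
    rw [List.infix_cons_iff]
    cases t with
    | nil =>
      simp [hasDDU]
    | cons b t' =>
      have hpre : (['_', '_'] <+: a :: b :: t') ↔ (a = '_' ∧ b = '_') := by
        simp [List.cons_prefix_cons, eq_comm]
      rw [hpre, ih]
      simp [hasDDU]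

theorem isIn_dd (l : List Char) : PySem.Chars.isIn ['_', '_'] l = hasDDU l := by
  apply Bool.eq_iff_iff.mpr
  rw [PySem.Chars.isIn_iff_infix]
  exact infix_dd_iff l

theorem go_eq_replU : ∀ (fuel : Nat) (l acc : List Char), l.length ≤ fuel →
    PySem.Chars.replace.go ['_', '_'] ['_'] fuel l acc = acc.reverse ++ replU l := by
  intro fuel
  induction fuel with
  | zero =>
    intro l acc h
    have : l = [] := by cases l <;> simp_all
    subst this
    simp [PySem.Chars.replace.go, replU]
  | succ n ih =>
    intro l acc h
    cases l with
    | nil => simp [PySem.Chars.replace.go, replU]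
    | cons c t =>
      rw [PySem.Chars.replace.go]
      by_cases hp : List.isPrefixOf ['_', '_'] (c :: t) = true
      · cases t with
        | nil => simp [List.isPrefixOf] at hp
        | cons d t' =>
          simp [List.isPrefixOf] at hp
          obtain ⟨rfl, rfl⟩ := hp
          simp only [List.isPrefixOf, BEq.rfl, Bool.true_and, if_pos]
          have hlen : t'.length ≤ n := by simp at h; omega
          rw [show (['_', '_'] : List Char).length = 2 from rfl]
          rw [show ('_' :: '_' :: t').drop 2 = t' from rfl]
          rw [ih t' _ hlen]
          simp [replU]
      · rw [if_neg hp]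
        have hlen : t.length ≤ n := by simp at h; omega
        rw [ih t _ hlen]
        have hr : replU (c :: t) = c :: replU t := by
          cases t with
          | nil => simp [replU]
          | cons d t' =>
            have hcd : ¬(c = '_' ∧ d = '_') := by
              rintro ⟨rfl, rfl⟩
              simp [List.isPrefixOf] at hp
            rw [replU, if_neg hcd]
        rw [hr]; simp

theorem replace_eq_replU (l : List Char) :
    PySem.Chars.replace l ['_', '_'] ['_'] = replU l := by
  rw [PySem.Chars.replace]
  simp only [List.isEmpty]
  exact go_eq_replU l.length l [] (le_refl _)

/-- The `while "__" in normalized: normalized = normalized.replace("__", "_")` loop of A. -/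
def collapseU (l : List Char) : List Char :=
  if h : PySem.Chars.isIn ['_', '_'] l = true then
    collapseU (PySem.Chars.replace l ['_', '_'] ['_'])
  else l
termination_by l.length
decreasing_by
  rw [replace_eq_replU]
  exact replU_len_lt l (by rw [← isIn_dd]; exact h)

def normalize_metric_label_py (value : String) (fallback : String) : String :=
  let raw := PySem.Str.lower (PySem.Str.strip (if value == "" then "" else value))
  if raw == "" then fallback
  else
    let normalized_chars := raw.toList.map (fun ch => if PySem.Chars.isalnum ch then ch else '_')
    let normalized := PySem.Chars.stripChars normalized_chars ['_']
    let final := collapseU normalized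
    if final.isEmpty then fallback else String.ofList final

-- ===== PORT B =====
def normalize_metric_label_py_alt (value : String) (fallback : String) : String :=
  let raw := PySem.Str.lower (PySem.Str.strip (if value == "" then "" else value))
  let res := (raw.toList.foldl
    (fun (st : List Char × Bool) ch =>
      if PySem.Chars.isalnum ch then
        ((if !st.2 && !st.1.isEmpty then st.1 ++ ['_'] else st.1) ++ [ch], true)
      else (st.1, false))
    (([] : List Char), false)).1
  if res.isEmpty then fallback else String.ofList res

-- ===== PRECONDITION & SPEC =====
def Spec_normalize_metric_label_py (value : String) (fallback : String) (out : String) : Prop := out = normalize_metric_label_py_alt value fallback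
instance (value : String) (fallback : String) (out : String) : Decidable (Spec_normalize_metric_label_py value fallback out) := by unfold Spec_normalize_metric_label_py; infer_instance

-- ===== CLAIM (what is proved, stated in full; the proofs are below) =====
def Claim_equal_normalize_metric_label_py : Prop := ∀ (value : String) (fallback : String), Dom_normalize_metric_label_py value fallback → Spec_normalize_metric_label_py value fallback (normalize_metric_label_py value fallback)

-- ===== LEMMAS AND PROOFS =====

/-- Collapse consecutive underscores to one (the fixpoint of A's while loop). -/
def squeezeU : List Char → List Char
  | a :: b :: t => if a = '_' ∧ b = '_' then squeezeU (b :: t) else a :: squeezeU (b :: t)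
  | l => l

/-- B's loop body, named for the proofs. -/
def stepU (st : List Char × Bool) (ch : Char) : List Char × Bool :=
  if PySem.Chars.isalnum ch then
    ((if !st.2 && !st.1.isEmpty then st.1 ++ ['_'] else st.1) ++ [ch], true)
  else (st.1, false)

/-- What B's loop emits after the first token has been opened (`out` nonempty);
    the Bool records whether the previous char was alphanumeric. -/
def GU : Bool → List Char → List Char
  | _, [] => []
  | b, c :: t =>
    if PySem.Chars.isalnum c then
      (if b then c :: GU true t else '_' :: c :: GU true t)
    else GU false t

/-- What B's loop emits from the initial empty state. -/
def FU : List Char → List Char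
  | [] => []
  | c :: t => if PySem.Chars.isalnum c then c :: GU true t else FU t

def pUc (c : Char) : Bool := c == '_'

/-- Right-strip of underscores. -/
def rsU (l : List Char) : List Char := (l.reverse.dropWhile pUc).reverse

def mU (l : List Char) : List Char := l.map (fun ch => if PySem.Chars.isalnum ch then ch else '_')

theorem stripChars_underscore (l : List Char) :
    PySem.Chars.stripChars l ['_'] = rsU (l.dropWhile pUc) := by
  have hp : (fun c => (['_'] : List Char).contains c) = pUc := by
    funext c
    by_cases hc : c = '_'
    · subst hc; rfl
    · simp [pUc, hc, beq_eq_false_iff_ne]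
  rw [PySem.Chars.stripChars, rsU, hp]

theorem squeezeU_cons_cons (a b : Char) (t : List Char) (h : ¬(a = '_' ∧ b = '_')) :
    squeezeU (a :: b :: t) = a :: squeezeU (b :: t) := by
  rw [squeezeU, if_neg h]

theorem squeezeU_dd (t : List Char) : squeezeU ('_' :: '_' :: t) = squeezeU ('_' :: t) := by
  rw [squeezeU, if_pos ⟨rfl, rfl⟩]

theorem squeezeU_cons_ne (c : Char) (x : List Char) (h : c ≠ '_') :
    squeezeU (c :: x) = c :: squeezeU x := by
  cases x with
  | nil => rfl
  | cons b y => exact squeezeU_cons_cons c b y (fun hh => h hh.1)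

theorem squeezeU_congr_cons (a : Char) (x y : List Char)
    (h1 : x.head? = y.head?) (h2 : squeezeU x = squeezeU y) :
    squeezeU (a :: x) = squeezeU (a :: y) := by
  cases x with
  | nil => cases y with
    | nil => rfl
    | cons h t => simp at h1
  | cons hx tx =>
    cases y with
    | nil => simp at h1
    | cons hy ty =>
      simp at h1
      subst h1
      by_cases hd : a = '_' ∧ hx = '_'
      · rw [squeezeU, if_pos hd, squeezeU, if_pos hd, h2]
      · rw [squeezeU_cons_cons _ _ _ hd, squeezeU_cons_cons _ _ _ hd, h2]

theorem squeezeU_of_no_dd (l : List Char) (h : hasDDU l = false) : squeezeU l = l := by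
  fun_induction squeezeU l with
  | case1 a b t hab ih =>
    obtain ⟨rfl, rfl⟩ := hab
    simp [hasDDU] at h
  | case2 a b t hab ih =>
    simp [hasDDU] at h
    rw [ih h.2]
  | case3 l hl => rfl

theorem replU_head? (l : List Char) : (replU l).head? = l.head? := by
  fun_induction replU l with
  | case1 a b t h ih => simp [h.1]
  | case2 a b t h ih => simp
  | case3 l h => rfl

theorem squeezeU_replU (l : List Char) : squeezeU (replU l) = squeezeU l := by
  fun_induction replU l with
  | case1 a b t h ih =>
    obtain ⟨rfl, rfl⟩ := h
    rw [squeezeU_dd]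
    exact squeezeU_congr_cons '_' (replU t) t (replU_head? t) ih
  | case2 a b t h ih =>
    exact squeezeU_congr_cons a (replU (b :: t)) (b :: t) (replU_head? _) ih
  | case3 l h => rfl

theorem collapseU_eq_squeezeU (l : List Char) : collapseU l = squeezeU l := by
  fun_induction collapseU l with
  | case1 l h ih =>
    rw [ih, replace_eq_replU, squeezeU_replU]
  | case2 l h =>
    have hdd : hasDDU l = false := by rw [← isIn_dd]; exact Bool.eq_false_iff.mpr h
    exact (squeezeU_of_no_dd l hdd).symm

theorem foldl_stepU_ne (t : List Char) : ∀ (out : List Char) (b : Bool), out ≠ [] →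
    (t.foldl stepU (out, b)).1 = out ++ GU b t := by
  induction t with
  | nil => intro out b _; simp [GU]
  | cons c t ih =>
    intro out b hout
    rw [List.foldl_cons]
    by_cases hc : PySem.Chars.isalnum c = true
    · rw [show stepU (out, b) c =
        ((if !b && !out.isEmpty then out ++ ['_'] else out) ++ [c], true) by simp [stepU, hc]]
      rw [ih _ _ (by simp)]
      cases b with
      | true => simp [GU, hc]
      | false =>
        have : out.isEmpty = false := by simpa [List.isEmpty_iff] using hout
        simp [GU, hc, this]
    · rw [show stepU (out, b) c = (out, false) by simp [stepU, hc]]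
      rw [ih _ _ hout]
      simp [GU, hc]

theorem foldl_stepU_nil (t : List Char) : (t.foldl stepU ([], false)).1 = FU t := by
  cases t with
  | nil => rfl
  | cons c t =>
    rw [List.foldl_cons]
    by_cases hc : PySem.Chars.isalnum c = true
    · rw [show stepU ([], false) c = ([c], true) by simp [stepU, hc]]
      rw [foldl_stepU_ne t [c] true (by simp)]
      simp [FU, hc]
    · rw [show stepU ([], false) c = ([], false) by simp [stepU, hc]]
      rw [foldl_stepU_nil t]  -- structural recursion on t
      simp [FU, hc]

theorem rsU_all (l : List Char) (h : ∀ c ∈ l, pUc c = true) : rsU l = [] := by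
  rw [rsU, List.dropWhile_eq_nil_iff.mpr (by simpa using fun c hc => h c hc)]
  rfl

theorem rsU_cons (c : Char) (x : List Char)
    (h : pUc c = false ∨ ∃ d ∈ x, pUc d = false) :
    rsU (c :: x) = c :: rsU x := by
  rw [rsU, rsU, List.reverse_cons, List.dropWhile_append]
  by_cases he : (x.reverse.dropWhile pUc).isEmpty = true
  · rw [if_pos he]
    have hx : x.reverse.dropWhile pUc = [] := by simpa [List.isEmpty_iff] using he
    have hall : ∀ d ∈ x, pUc d = true := by
      have := List.dropWhile_eq_nil_iff.mp hx
      intro d hd; exact this d (by simpa using hd)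
    have hc : pUc c = false := by
      rcases h with h | ⟨d, hd, hdf⟩
      · exact h
      · exact absurd (hall d hd) (by simp [hdf])
    rw [List.dropWhile_cons_of_neg (by simp [hc])]
    simp [hx]
  · rw [if_neg he]
    simp

theorem pUc_of_alnum (c : Char) (h : PySem.Chars.isalnum c = true) : pUc c = false := by
  by_cases hc : c = '_'
  · subst hc; exact absurd h (by decide)
  · simp [pUc, hc]

theorem ne_underscore_of_alnum (c : Char) (h : PySem.Chars.isalnum c = true) : c ≠ '_' := by
  intro hc; subst hc; exact absurd h (by decide)

theorem GU_none (t : List Char) (h : ∀ x ∈ t, PySem.Chars.isalnum x = false) :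
    ∀ b, GU b t = [] := by
  induction t with
  | nil => intro b; rfl
  | cons c t ih =>
    intro b
    have hc : PySem.Chars.isalnum c = false := h c (by simp)
    rw [GU]
    simp [hc]
    exact ih (fun x hx => h x (by simp [hx])) false

theorem core23 : ∀ (n : Nat) (t : List Char), t.length ≤ n →
    (squeezeU (rsU (mU t)) = GU true t) ∧
    ((∃ x ∈ t, PySem.Chars.isalnum x = true) → squeezeU ('_' :: rsU (mU t)) = GU false t) := by
  intro n
  induction n with
  | zero =>
    intro t ht
    have : t = [] := by cases t <;> simp_all
    subst this
    exact ⟨rfl, by simp⟩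
  | succ n ih =>
    intro t ht
    cases t with
    | nil => exact ⟨rfl, by simp⟩
    | cons c t' =>
      have ht' : t'.length ≤ n := by simp at ht; omega
      by_cases hc : PySem.Chars.isalnum c = true
      · have hm : mU (c :: t') = c :: mU t' := by simp [mU, hc]
        have hne := ne_underscore_of_alnum c hc
        have hrs : rsU (mU (c :: t')) = c :: rsU (mU t') := by
          rw [hm]; exact rsU_cons c _ (Or.inl (pUc_of_alnum c hc))
        constructor
        · rw [hrs, squeezeU_cons_ne c _ hne, (ih t' ht').1]
          simp [GU, hc]
        · intro _
          rw [hrs, squeezeU_cons_cons '_' c _ (fun hh => hne hh.2),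
            squeezeU_cons_ne c _ hne, (ih t' ht').1]
          simp [GU, hc]
      · have hm : mU (c :: t') = '_' :: mU t' := by simp [mU, hc]
        by_cases hex : ∃ x ∈ t', PySem.Chars.isalnum x = true
        · obtain ⟨x, hx, hxal⟩ := hex
          have hmem : ∃ d ∈ mU t', pUc d = false := by
            refine ⟨x, ?_, pUc_of_alnum x hxal⟩
            rw [mU]
            exact List.mem_map.mpr ⟨x, hx, by simp [hxal]⟩
          have hrs : rsU (mU (c :: t')) = '_' :: rsU (mU t') := by
            rw [hm]; exact rsU_cons '_' _ (Or.inr hmem)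
          constructor
          · rw [hrs, (ih t' ht').2 ⟨x, hx, hxal⟩]
            simp [GU, hc]
          · intro _
            rw [hrs, squeezeU_dd, (ih t' ht').2 ⟨x, hx, hxal⟩]
            simp [GU, hc]
        · have hall : ∀ x ∈ c :: t', PySem.Chars.isalnum x = false := by
            intro x hx
            rcases List.mem_cons.mp hx with rfl | hx'
            · exact Bool.eq_false_iff.mpr hc
            · cases hal : PySem.Chars.isalnum x with
              | true => exact absurd ⟨x, hx', hal⟩ hex
              | false => rfl
          have hallU : ∀ d ∈ mU (c :: t'), pUc d = true := by
            intro d hd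
            rw [mU] at hd
            obtain ⟨x, hx, rfl⟩ := List.mem_map.mp hd
            simp [hall x hx, pUc]
          constructor
          · rw [rsU_all _ hallU, GU_none (c :: t') hall true]; rfl
          · rintro ⟨x, hx, hxal⟩
            exact absurd hxal (by simp [hall x hx])

theorem core_main (r : List Char) :
    squeezeU (rsU ((mU r).dropWhile pUc)) = FU r := by
  induction r with
  | nil => rfl
  | cons c t ih =>
    by_cases hc : PySem.Chars.isalnum c = true
    · have hm : mU (c :: t) = c :: mU t := by simp [mU, hc]
      rw [hm, List.dropWhile_cons_of_neg (by simp [pUc_of_alnum c hc]),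
        rsU_cons c _ (Or.inl (pUc_of_alnum c hc)),
        squeezeU_cons_ne c _ (ne_underscore_of_alnum c hc),
        (core23 (mU t).length t (by simp [mU])).1]
      simp [FU, hc]
    · have hm : mU (c :: t) = '_' :: mU t := by simp [mU, hc]
      rw [hm, List.dropWhile_cons_of_pos (by simp [pUc]), ih]
      simp [FU, hc]

-- ===== VERDICT (by name: the statement is the Claim_ definition above) =====
theorem normalize_metric_label_py_spec : Claim_equal_normalize_metric_label_py := by
  intro value fallback _
  unfold Spec_normalize_metric_label_py normalize_metric_label_py normalize_metric_label_py_alt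
  by_cases h : PySem.Str.lower (PySem.Str.strip (if value == "" then "" else value)) = ""
  · simp only [h]
    simp
  · have hb : (PySem.Str.lower (PySem.Str.strip (if value == "" then "" else value)) == "") = false :=
      beq_eq_false_iff_ne.mpr h
    simp only [hb, Bool.false_eq_true]
    set r := (PySem.Str.lower (PySem.Str.strip (if value == "" then "" else value))).toList with hr
    have hA : collapseU (PySem.Chars.stripChars
        (r.map (fun ch => if PySem.Chars.isalnum ch then ch else '_')) ['_']) = FU r := by
      rw [show r.map (fun ch => if PySem.Chars.isalnum ch then ch else '_') = mU r from rfl,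
        stripChars_underscore, collapseU_eq_squeezeU, core_main]
    have hB : (r.foldl
        (fun (st : List Char × Bool) ch =>
          if PySem.Chars.isalnum ch then
            ((if !st.2 && !st.1.isEmpty then st.1 ++ ['_'] else st.1) ++ [ch], true)
          else (st.1, false))
        (([] : List Char), false)).1 = FU r := by
      rw [show (fun (st : List Char × Bool) ch =>
          if PySem.Chars.isalnum ch then
            ((if !st.2 && !st.1.isEmpty then st.1 ++ ['_'] else st.1) ++ [ch], true)
          else (st.1, false)) = stepU from rfl]
      exact foldl_stepU_nil r
    rw [hA, hB]
    simp
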